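-- pv_equiv track=rewrite | github.com/8x15yz/Algorithm-Solutions | 2023/programers/08/안전지대.py | solution
-- ===== SOURCE A (Python) =====
-- dt = [(1, 0), (0, 1), (-1, 0), (0, -1), (-1, -1), (1, 1), (1, -1),(-1, 1)]
--
-- def solution(board):
--     answer = 0
--     n = len(board)
--     for i in range(n):
--         for j in range(n):
--             if board[i][j] == 1:
--                 for di, dj in dt:
--                     if 0 <= i+di < n and 0 <= j+dj < n and board[i+di][j+dj] != 1:
--                         board[i+di][j+dj] = 2
--
--     for i in range(n):
--         for j in range(n):
--             if board[i][j] == 0: answer += 1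
--     return answer
-- ===== SOURCE B (Python) =====
-- dt = [(1, 0), (0, 1), (-1, 0), (0, -1), (-1, -1), (1, 1), (1, -1), (-1, 1)]
--
-- def solution(board):
--     # pure gather pass: a cell counts iff it is 0 and no in-bounds 8-neighbor is a mine.
--     # (unlike A, this does not mutate `board`)
--     n = len(board)
--     return sum(
--         1
--         for i in range(n)
--         for j in range(n)
--         if board[i][j] == 0
--         and not any(
--             0 <= i + di < n and 0 <= j + dj < n and board[i + di][j + dj] == 1
--             for di, dj in dt
--         )
--     )
-- ===== Notes on version B (the rewrite author's own statement) =====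
-- stated objective: alternative
-- what changed: B replaces A's mutating scatter (mark every non-mine neighbor of each mine as 2 on the board, then count zeros on the mutated board) with a pure single gather pass that counts cells that are 0 and have no in-bounds mine neighbor, never mutating the board.
import Mathlib
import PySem

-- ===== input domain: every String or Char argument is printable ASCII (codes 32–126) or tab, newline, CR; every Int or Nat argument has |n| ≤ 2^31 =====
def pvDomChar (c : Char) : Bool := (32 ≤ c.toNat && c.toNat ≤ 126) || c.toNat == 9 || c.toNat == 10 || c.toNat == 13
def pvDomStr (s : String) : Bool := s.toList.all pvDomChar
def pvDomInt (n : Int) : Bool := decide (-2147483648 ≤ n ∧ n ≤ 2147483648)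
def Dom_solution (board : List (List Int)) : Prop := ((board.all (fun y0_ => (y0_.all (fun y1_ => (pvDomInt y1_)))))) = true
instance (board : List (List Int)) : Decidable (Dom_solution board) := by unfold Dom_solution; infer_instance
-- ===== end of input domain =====

-- B replaces A's mutating scatter pass by a pure gather pass (A mutates its argument
-- in place; the equivalence proved here is about the RETURN value only, B does not mutate).

-- ===== PORT A =====
def dtList : List (Int × Int) :=
  [(1, 0), (0, 1), (-1, 0), (0, -1), (-1, -1), (1, 1), (1, -1), (-1, 1)]

-- board[i][j] read; the default 0 is never reached on inputs satisfying Pre_solution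
-- (all indices A actually reads/writes are in range there).
def bGet (b : List (List Int)) (i j : Nat) : Int := (b.getD i []).getD j 0

-- board[i][j] = v
def bSet (b : List (List Int)) (i j : Nat) (v : Int) : List (List Int) :=
  b.set i ((b.getD i []).set j v)

-- the inner 'for di, dj in dt' loop of A, for a trigger cell (i, j)
def markOne (n i j : Nat) (b : List (List Int)) : List (List Int) :=
  dtList.foldl (fun b d =>
    if 0 ≤ (i : Int) + d.1 ∧ (i : Int) + d.1 < (n : Int) ∧
       0 ≤ (j : Int) + d.2 ∧ (j : Int) + d.2 < (n : Int) ∧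
       bGet b ((i : Int) + d.1).toNat ((j : Int) + d.2).toNat ≠ 1
    then bSet b ((i : Int) + d.1).toNat ((j : Int) + d.2).toNat 2 else b) b

-- A's first double loop (the mutation phase)
def phase1 (n : Nat) (b0 : List (List Int)) : List (List Int) :=
  (List.range n).foldl (fun b i =>
    (List.range n).foldl (fun b j =>
      if bGet b i j = 1 then markOne n i j b else b) b) b0

def solution (board : List (List Int)) : Int :=
  let n := board.length
  let b := phase1 n board
  (List.range n).foldl (fun a i =>
    (List.range n).foldl (fun a j => if bGet b i j = 0 then a + 1 else a) a) 0

-- ===== PORT B =====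
def inb (n : Nat) (x : Int) : Bool := decide (0 ≤ x) && decide (x < (n : Int))

-- 'any(... for di, dj in dt)' of Source B
def mined (board : List (List Int)) (n i j : Nat) : Bool :=
  dtList.any (fun d =>
    inb n ((i : Int) + d.1) && inb n ((j : Int) + d.2) &&
    (bGet board ((i : Int) + d.1).toNat ((j : Int) + d.2).toNat == 1))

-- the generator's condition in Source B
def safe (board : List (List Int)) (n i j : Nat) : Bool :=
  (bGet board i j == 0) && !(mined board n i j)

def solution_alt (board : List (List Int)) : Int :=
  let n := board.length
  (((List.range n).map (fun i =>
      ((List.range n).filter (fun j => safe board n i j)).length)).sum : Int)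

-- ===== PRECONDITION & SPEC =====
-- Pre_ excludes exactly the inputs on which the Python A raises IndexError:
-- some row shorter than the number of rows (A indexes every column < len(board) of every row).
def Pre_solution (board : List (List Int)) : Prop :=
  ∀ row ∈ board, board.length ≤ row.length

instance (board : List (List Int)) : Decidable (Pre_solution board) := by
  unfold Pre_solution; infer_instance

def pvWitness_solution : List (List Int) := [[1, 0], [0, 0]]

def Spec_solution (board : List (List Int)) (out : Int) : Prop := out = solution_alt board
instance (board : List (List Int)) (out : Int) : Decidable (Spec_solution board out) := by
  unfold Spec_solution; infer_instance

-- ===== CLAIM (what is proved, stated in full; the proofs are below) =====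
def Claim_equal_solution : Prop := ∀ (board : List (List Int)), Dom_solution board → Pre_solution board → Spec_solution board (solution board)

-- ===== LEMMAS AND PROOFS =====

-- named versions of the two fold bodies of A's mutation phase
def mstep (n i j : Nat) (b : List (List Int)) (d : Int × Int) : List (List Int) :=
  if 0 ≤ (i : Int) + d.1 ∧ (i : Int) + d.1 < (n : Int) ∧
     0 ≤ (j : Int) + d.2 ∧ (j : Int) + d.2 < (n : Int) ∧
     bGet b ((i : Int) + d.1).toNat ((j : Int) + d.2).toNat ≠ 1
  then bSet b ((i : Int) + d.1).toNat ((j : Int) + d.2).toNat 2 else b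

def tstep (n : Nat) (b : List (List Int)) (p : Nat × Nat) : List (List Int) :=
  if bGet b p.1 p.2 = 1 then markOne n p.1 p.2 b else b

def pairs (n : Nat) : List (Nat × Nat) :=
  (List.range n).flatMap (fun i => (List.range n).map (fun j => (i, j)))

-- same shape (row count and row lengths)
def bDims (orig b : List (List Int)) : Prop :=
  b.length = orig.length ∧ ∀ k, (b.getD k []).length = (orig.getD k []).length

-- invariant: b agrees with orig except that exactly the non-mine cells satisfying P hold 2
def MInv (orig : List (List Int)) (n : Nat) (P : Nat → Nat → Prop) (b : List (List Int)) : Prop :=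
  bDims orig b ∧ ∀ x y : Nat,
    ((x < n ∧ y < n ∧ bGet orig x y ≠ 1 ∧ P x y) → bGet b x y = 2) ∧
    (¬(x < n ∧ y < n ∧ bGet orig x y ≠ 1 ∧ P x y) → bGet b x y = bGet orig x y)

-- (x, y) is a cell some trigger in S (a mine cell of the original board) marks
def markedBy (orig : List (List Int)) (S : List (Nat × Nat)) (x y : Nat) : Prop :=
  ∃ p ∈ S, bGet orig p.1 p.2 = 1 ∧
    ∃ d ∈ dtList, (x : Int) = (p.1 : Int) + d.1 ∧ (y : Int) = (p.2 : Int) + d.2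

theorem getD_set_row (b : List (List Int)) (i : Nat) (r : List Int) (x : Nat)
    (hi : i < b.length) :
    (b.set i r).getD x [] = if x = i then r else b.getD x [] := by
  simp only [List.getD, List.getElem?_set]
  split_ifs with h1 h2 h3
  · rfl
  · exact absurd h1.symm h2
  · exact absurd h3.symm h1
  · rfl

theorem getD_set_col (r : List Int) (j : Nat) (v : Int) (y : Nat) (hj : j < r.length) :
    (r.set j v).getD y 0 = if y = j then v else r.getD y 0 := by
  simp only [List.getD, List.getElem?_set]
  split_ifs with h1 h2 h3
  · rfl
  · exact absurd h1.symm h2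
  · exact absurd h3.symm h1
  · rfl

theorem bSet_dims (b : List (List Int)) (i j : Nat) (v : Int)
    (hi : i < b.length) :
    bDims b (bSet b i j v) := by
  unfold bDims bSet
  refine ⟨List.length_set .., fun k => ?_⟩
  rw [getD_set_row b i _ k hi]
  split_ifs with h
  · subst h; exact List.length_set ..
  · rfl

theorem bDims_trans {a b c : List (List Int)} (h1 : bDims a b) (h2 : bDims b c) : bDims a c := by
  obtain ⟨h1a, h1b⟩ := h1; obtain ⟨h2a, h2b⟩ := h2
  exact ⟨h2a.trans h1a, fun k => (h2b k).trans (h1b k)⟩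

theorem bGet_bSet (b : List (List Int)) (i j : Nat) (v : Int) (x y : Nat)
    (hi : i < b.length) (hj : j < (b.getD i []).length) :
    bGet (bSet b i j v) x y = if x = i ∧ y = j then v else bGet b x y := by
  unfold bGet bSet
  rw [getD_set_row b i _ x hi]
  by_cases hx : x = i
  · subst hx
    rw [if_pos rfl, getD_set_col _ j v y hj]
    by_cases hy : y = j
    · simp [hy]
    · simp [hy]
  · rw [if_neg hx, if_neg (fun h : x = i ∧ y = j => hx h.1)]

theorem MInv_congr {orig : List (List Int)} {n : Nat} {P Q : Nat → Nat → Prop}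
    {b : List (List Int)} (h : ∀ x y, P x y ↔ Q x y) (hI : MInv orig n P b) :
    MInv orig n Q b := by
  refine ⟨hI.1, fun x y => ?_⟩
  obtain ⟨h1, h2⟩ := hI.2 x y
  exact ⟨fun hc => h1 ⟨hc.1, hc.2.1, hc.2.2.1, (h x y).mpr hc.2.2.2⟩,
         fun hc => h2 (fun hc' => hc ⟨hc'.1, hc'.2.1, hc'.2.2.1, (h x y).mp hc'.2.2.2⟩)⟩

theorem mstep_inv {orig : List (List Int)} {n : Nat} (hn : orig.length = n)
    (hrow : ∀ k, k < n → n ≤ (orig.getD k []).length)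
    {i j : Nat} {P : Nat → Nat → Prop} {b : List (List Int)} (d : Int × Int)
    (hI : MInv orig n P b) :
    MInv orig n (fun x y => P x y ∨ ((x : Int) = (i : Int) + d.1 ∧ (y : Int) = (j : Int) + d.2))
      (mstep n i j b d) := by
  obtain ⟨hdims, hcell⟩ := hI
  unfold mstep
  split_ifs with hg
  · obtain ⟨hg1, hg2, hg3, hg4, hg5⟩ := hg
    have hXn : ((i : Int) + d.1).toNat < n := by omega
    have hYn : ((j : Int) + d.2).toNat < n := by omega
    have hXl : ((i : Int) + d.1).toNat < b.length := by rw [hdims.1, hn]; exact hXn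
    have hYl : ((j : Int) + d.2).toNat < (b.getD ((i : Int) + d.1).toNat []).length := by
      rw [hdims.2]; exact lt_of_lt_of_le hYn (hrow _ hXn)
    have horigXY : bGet orig ((i : Int) + d.1).toNat ((j : Int) + d.2).toNat ≠ 1 := by
      rcases em (((i : Int) + d.1).toNat < n ∧ ((j : Int) + d.2).toNat < n ∧
          bGet orig ((i : Int) + d.1).toNat ((j : Int) + d.2).toNat ≠ 1 ∧
          P ((i : Int) + d.1).toNat ((j : Int) + d.2).toNat) with hc | hc
      · exact hc.2.2.1
      · intro h; exact hg5 (((hcell _ _).2 hc).trans h)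
    refine ⟨bDims_trans hdims (bSet_dims b _ _ 2 hXl), fun x y => ?_⟩
    rw [bGet_bSet b _ _ 2 x y hXl hYl]
    by_cases he : x = ((i : Int) + d.1).toNat ∧ y = ((j : Int) + d.2).toNat
    · obtain ⟨rfl, rfl⟩ := he
      rw [if_pos ⟨rfl, rfl⟩]
      refine ⟨fun _ => rfl, fun hnc => absurd ⟨hXn, hYn, horigXY, Or.inr ⟨by omega, by omega⟩⟩ hnc⟩
    · rw [if_neg he]
      constructor
      · rintro ⟨hx, hy, h1, hP | ⟨hex, hey⟩⟩
        · exact (hcell x y).1 ⟨hx, hy, h1, hP⟩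
        · exact absurd ⟨by omega, by omega⟩ he
      · intro hnc
        exact (hcell x y).2 (fun hc => hnc ⟨hc.1, hc.2.1, hc.2.2.1, Or.inl hc.2.2.2⟩)
  · refine ⟨hdims, fun x y => ?_⟩
    constructor
    · rintro ⟨hx, hy, h1, hP | ⟨hex, hey⟩⟩
      · exact (hcell x y).1 ⟨hx, hy, h1, hP⟩
      · exfalso
        have hb : ¬ bGet b ((i : Int) + d.1).toNat ((j : Int) + d.2).toNat ≠ 1 := by
          intro h5; exact hg ⟨by omega, by omega, by omega, by omega, h5⟩
        push_neg at hb
        have hxx : ((i : Int) + d.1).toNat = x := by omega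
        have hyy : ((j : Int) + d.2).toNat = y := by omega
        rw [hxx, hyy] at hb
        rcases em (x < n ∧ y < n ∧ bGet orig x y ≠ 1 ∧ P x y) with hc | hc
        · have h2 := (hcell x y).1 hc; rw [h2] at hb; norm_num at hb
        · have h2 := (hcell x y).2 hc; rw [h2] at hb; exact h1 hb
    · intro hnc
      exact (hcell x y).2 (fun hc => hnc ⟨hc.1, hc.2.1, hc.2.2.1, Or.inl hc.2.2.2⟩)

theorem mfold_inv {orig : List (List Int)} {n : Nat} (hn : orig.length = n)
    (hrow : ∀ k, k < n → n ≤ (orig.getD k []).length)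
    {i j : Nat} (ds : List (Int × Int)) {P : Nat → Nat → Prop} {b : List (List Int)}
    (hI : MInv orig n P b) :
    MInv orig n (fun x y => P x y ∨ ∃ d ∈ ds, (x : Int) = (i : Int) + d.1 ∧ (y : Int) = (j : Int) + d.2)
      (ds.foldl (mstep n i j) b) := by
  induction ds generalizing P b with
  | nil => simp only [List.foldl_nil]; exact MInv_congr (by simp) hI
  | cons d tl ih =>
    simp only [List.foldl_cons]
    refine MInv_congr ?_ (ih (mstep_inv hn hrow d hI))
    intro x y; constructor
    · rintro ((hP | hd) | ⟨d', hd', h⟩)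
      · exact Or.inl hP
      · exact Or.inr ⟨d, by simp, hd⟩
      · exact Or.inr ⟨d', by simp [hd'], h⟩
    · rintro (hP | ⟨d', hd', h⟩)
      · exact Or.inl (Or.inl hP)
      · rcases List.mem_cons.mp hd' with h' | h'
        · exact Or.inl (Or.inr (h' ▸ h))
        · exact Or.inr ⟨d', h', h⟩

theorem markOne_eq (n i j : Nat) (b : List (List Int)) :
    markOne n i j b = dtList.foldl (mstep n i j) b := rfl

theorem tstep_inv {orig : List (List Int)} {n : Nat} (hn : orig.length = n)
    (hrow : ∀ k, k < n → n ≤ (orig.getD k []).length)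
    {S : List (Nat × Nat)} {b : List (List Int)} (p : Nat × Nat)
    (hI : MInv orig n (markedBy orig S) b) :
    MInv orig n (markedBy orig (S ++ [p])) (tstep n b p) := by
  obtain ⟨hdims, hcell⟩ := hI
  unfold tstep
  by_cases ho : bGet orig p.1 p.2 = 1
  · have hb1 : bGet b p.1 p.2 = 1 := by
      rw [(hcell p.1 p.2).2 (fun hc => hc.2.2.1 ho)]; exact ho
    rw [if_pos hb1, markOne_eq]
    refine MInv_congr ?_ (mfold_inv hn hrow (i := p.1) (j := p.2) dtList ⟨hdims, hcell⟩)
    intro x y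
    constructor
    · rintro (⟨q, hq, h⟩ | ⟨d, hd, h⟩)
      · exact ⟨q, by simp [hq], h⟩
      · exact ⟨p, by simp, ho, d, hd, h⟩
    · rintro ⟨q, hq, h1, hrest⟩
      rcases List.mem_append.mp hq with hq | hq
      · exact Or.inl ⟨q, hq, h1, hrest⟩
      · have hqp : q = p := by simpa using hq
        subst hqp; exact Or.inr hrest
  · have hb : ¬ bGet b p.1 p.2 = 1 := by
      intro h
      rcases em (p.1 < n ∧ p.2 < n ∧ bGet orig p.1 p.2 ≠ 1 ∧ markedBy orig S p.1 p.2) with hc | hc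
      · have h2 := (hcell p.1 p.2).1 hc; rw [h2] at h; norm_num at h
      · have h2 := (hcell p.1 p.2).2 hc; rw [h2] at h; exact ho h
    rw [if_neg hb]
    refine MInv_congr ?_ ⟨hdims, hcell⟩
    intro x y
    constructor
    · rintro ⟨q, hq, h⟩; exact ⟨q, by simp [hq], h⟩
    · rintro ⟨q, hq, h1, hrest⟩
      rcases List.mem_append.mp hq with hq | hq
      · exact ⟨q, hq, h1, hrest⟩
      · have hqp : q = p := by simpa using hq
        subst hqp; exact absurd h1 ho

theorem tfold_inv {orig : List (List Int)} {n : Nat} (hn : orig.length = n)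
    (hrow : ∀ k, k < n → n ≤ (orig.getD k []).length)
    (L : List (Nat × Nat)) {S : List (Nat × Nat)} {b : List (List Int)}
    (hI : MInv orig n (markedBy orig S) b) :
    MInv orig n (markedBy orig (S ++ L)) (L.foldl (tstep n) b) := by
  induction L generalizing S b with
  | nil => simpa using hI
  | cons p tl ih =>
    simp only [List.foldl_cons]
    have h2 := ih (tstep_inv hn hrow p hI)
    rwa [List.append_assoc, List.singleton_append] at h2

theorem foldl_flatMap {α β γ : Type} (l : List α) (g : α → List β) (f : γ → β → γ) (b : γ) :
    (l.flatMap g).foldl f b = l.foldl (fun b a => (g a).foldl f b) b := by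
  induction l generalizing b with
  | nil => rfl
  | cons a tl ih => simp [List.flatMap_cons, List.foldl_append, ih]

theorem phase1_eq (n : Nat) (b0 : List (List Int)) :
    phase1 n b0 = (pairs n).foldl (tstep n) b0 := by
  unfold phase1 pairs
  rw [foldl_flatMap]
  simp only [List.foldl_map]
  rfl

theorem mem_pairs (n : Nat) (p : Nat × Nat) : p ∈ pairs n ↔ p.1 < n ∧ p.2 < n := by
  unfold pairs
  simp only [List.mem_flatMap, List.mem_map, List.mem_range]
  constructor
  · rintro ⟨i, hi, j, hj, rfl⟩; exact ⟨hi, hj⟩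
  · rintro ⟨h1, h2⟩; exact ⟨p.1, h1, p.2, h2, rfl⟩

theorem neg_mem_dtList {d : Int × Int} (h : d ∈ dtList) : (-d.1, -d.2) ∈ dtList := by
  fin_cases h <;> decide

theorem markedBy_pairs (orig : List (List Int)) (n : Nat) (x y : Nat)
    (hx : x < n) (hy : y < n) :
    markedBy orig (pairs n) x y ↔ mined orig n x y = true := by
  unfold markedBy mined
  rw [List.any_eq_true]
  constructor
  · rintro ⟨p, hp, h1, d, hd, hex, hey⟩
    obtain ⟨hp1, hp2⟩ := (mem_pairs n p).mp hp
    refine ⟨(-d.1, -d.2), neg_mem_dtList hd, ?_⟩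
    have hx1 : (x : Int) + -d.1 = (p.1 : Int) := by omega
    have hy1 : (y : Int) + -d.2 = (p.2 : Int) := by omega
    simp only [inb, hx1, hy1, Int.toNat_natCast, Bool.and_eq_true, decide_eq_true_eq,
      beq_iff_eq]
    exact ⟨⟨⟨by positivity, by exact_mod_cast hp1⟩, by positivity, by exact_mod_cast hp2⟩, h1⟩
  · rintro ⟨d, hd, hcond⟩
    simp only [inb, Bool.and_eq_true, decide_eq_true_eq, beq_iff_eq] at hcond
    obtain ⟨⟨⟨hc1, hc2⟩, hc3, hc4⟩, hc5⟩ := hcond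
    refine ⟨(((x : Int) + d.1).toNat, ((y : Int) + d.2).toNat),
      (mem_pairs n _).mpr ⟨by omega, by omega⟩, hc5, (-d.1, -d.2), neg_mem_dtList hd,
      by omega, by omega⟩

-- A's counting fold as a filtered count
theorem foldl_count {α : Type} (l : List α) (c : α → Prop) [DecidablePred c] (a : Int) :
    l.foldl (fun a j => if c j then a + 1 else a) a
      = a + ((l.filter (fun j => decide (c j))).length : Nat) := by
  induction l generalizing a with
  | nil => simp
  | cons x tl ih =>
    by_cases h : c x <;> simp [List.filter_cons, h, ih] <;> push_cast <;> ring

theorem double_count {α β : Type} (lo : List α) (li : List β) (q : α → β → Prop)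
    [∀ i j, Decidable (q i j)] (a : Int) :
    lo.foldl (fun a i => li.foldl (fun a j => if q i j then a + 1 else a) a) a
      = a + ((lo.map (fun i => (li.filter (fun j => decide (q i j))).length)).sum : Nat) := by
  induction lo generalizing a with
  | nil => simp
  | cons i tl ih =>
    simp only [List.foldl_cons, List.map_cons, List.sum_cons]
    rw [ih, foldl_count]
    push_cast; ring

-- ===== VERDICT (by name: the statement is the Claim_ definition above) =====
theorem solution_spec : Claim_equal_solution := by
  intro board _ hPre
  unfold Spec_solution
  have hrow : ∀ k, k < board.length → board.length ≤ (board.getD k []).length := by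
    intro k hk
    refine hPre _ ?_
    rw [List.getD, List.getElem?_eq_getElem hk]
    exact List.getElem_mem hk
  have hinit : MInv board board.length (markedBy board []) board := by
    refine ⟨⟨rfl, fun k => rfl⟩, fun x y => ⟨?_, fun _ => rfl⟩⟩
    rintro ⟨_, _, _, p, hp, -⟩
    cases hp
  have hfin : MInv board board.length (markedBy board (pairs board.length))
      (phase1 board.length board) := by
    rw [phase1_eq]
    have h := tfold_inv rfl hrow (pairs board.length) hinit
    rwa [List.nil_append] at h
  obtain ⟨-, hc⟩ := hfin
  have hcell : ∀ i j, i < board.length → j < board.length →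
      ((bGet (phase1 board.length board) i j = 0) ↔
        safe board board.length i j = true) := by
    intro i j hi hj
    unfold safe
    rw [Bool.and_eq_true, beq_iff_eq, Bool.not_eq_eq_eq_not, Bool.not_true]
    by_cases h0 : bGet board i j = 0
    · have h1 : bGet board i j ≠ 1 := by rw [h0]; norm_num
      by_cases hm : mined board board.length i j = true
      · have h2 := (hc i j).1 ⟨hi, hj, h1, (markedBy_pairs board board.length i j hi hj).mpr hm⟩
        rw [h2, hm]
        constructor
        · intro h; norm_num at h
        · rintro ⟨-, h⟩; cases h
      · have h2 := (hc i j).2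
          (fun hc' => hm ((markedBy_pairs board board.length i j hi hj).mp hc'.2.2.2))
        rw [h2, h0]
        simp [Bool.not_eq_true] at hm ⊢
        exact hm
    · have h2 : bGet (phase1 board.length board) i j = 2 ∨
          bGet (phase1 board.length board) i j = bGet board i j := by
        rcases em (i < board.length ∧ j < board.length ∧ bGet board i j ≠ 1 ∧
            markedBy board (pairs board.length) i j) with hc' | hc'
        · exact Or.inl ((hc i j).1 hc')
        · exact Or.inr ((hc i j).2 hc')
      constructor
      · intro h
        rcases h2 with h2 | h2 <;> rw [h2] at h
        · norm_num at h
        · exact absurd h h0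
      · rintro ⟨he, -⟩; exact absurd he h0
  rw [show solution board = (List.range board.length).foldl (fun a i =>
      (List.range board.length).foldl (fun a j =>
        if bGet (phase1 board.length board) i j = 0 then a + 1 else a) a) 0 from rfl]
  rw [show solution_alt board = (((List.range board.length).map (fun i =>
      ((List.range board.length).filter
        (fun j => safe board board.length i j)).length)).sum : Int) from rfl]
  rw [double_count (List.range board.length) (List.range board.length)
    (fun i j => bGet (phase1 board.length board) i j = 0) 0]
  have hmap : (List.range board.length).map (fun i =>
        ((List.range board.length).filter
          (fun j => decide (bGet (phase1 board.length board) i j = 0))).length)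
      = (List.range board.length).map (fun i =>
        ((List.range board.length).filter (fun j => safe board board.length i j)).length) := by
    refine List.map_congr_left (fun i hi => ?_)
    congr 1
    refine List.filter_congr (fun j hj => ?_)
    have h := hcell i j (List.mem_range.mp hi) (List.mem_range.mp hj)
    cases hs : safe board board.length i j
    · rw [hs] at h
      exact decide_eq_false (fun hp => by cases h.mp hp)
    · exact decide_eq_true (h.mpr hs)
  rw [hmap, zero_add]
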